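-- pv_equiv track=rewrite | github.com/ashishk1331/cassidyAskedMe | Days/353.py | fixInvertedPunc
-- ===== SOURCE A (Python) =====
-- dmap = {"!": "¡", "?": "¿"}
--
-- def fixInvertedPunc(string):
--     result = []
--     temp = []
--
--     for word in string.split():
--         temp.append(word)
--
--         if word.endswith("!") or word.endswith("?"):
--
--             if not temp[0].startswith(dmap[word[-1]]):
--                 temp[0] = dmap[word[-1]] + temp[0]
--
--             result.extend(temp)
--             temp = []
--
--     return " ".join(result)
-- ===== SOURCE B (Python) =====
-- dmap = {"!": "¡", "?": "¿"}
--
-- def fixInvertedPunc(string):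
--     words = string.split()
--     pieces = []
--     start = 0
--     for i, w in enumerate(words):
--         if w[-1] in dmap:
--             mark = dmap[w[-1]]
--             seg = words[start:i + 1]
--             if not seg[0].startswith(mark):
--                 seg[0] = mark + seg[0]
--             pieces.append(" ".join(seg))
--             start = i + 1
--     return " ".join(pieces)
-- ===== Notes on version B (the rewrite author's own statement) =====
-- stated objective: alternative
-- what changed: Replaces A's streaming temp-accumulator fold with a two-level decomposition: an enumerate-driven scan that detects sentence boundaries by last-character dict membership, cuts each sentence out as the slice words[start:i+1], fixes its first word, joins it into a piece of its own, and finally joins the pieces.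
import Mathlib
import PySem

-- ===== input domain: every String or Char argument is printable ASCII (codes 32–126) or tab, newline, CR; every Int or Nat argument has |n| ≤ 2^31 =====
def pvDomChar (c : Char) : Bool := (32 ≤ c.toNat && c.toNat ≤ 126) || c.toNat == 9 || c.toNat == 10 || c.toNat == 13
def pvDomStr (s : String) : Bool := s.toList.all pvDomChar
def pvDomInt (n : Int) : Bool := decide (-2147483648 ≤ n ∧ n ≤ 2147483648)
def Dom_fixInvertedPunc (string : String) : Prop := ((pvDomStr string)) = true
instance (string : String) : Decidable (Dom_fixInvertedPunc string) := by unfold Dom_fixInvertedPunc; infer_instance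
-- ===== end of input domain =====

-- B replaces A's streaming word-accumulator with an enumerate-driven boundary scan that
-- joins each slice words[start:i+1] as its own piece (objective: alternative decomposition).

-- ===== PORT A =====
-- dmap = {"!": "¡", "?": "¿"}  (keys are single characters, modelled as Char)
def pvDmap : PySem.Dict Char String := PySem.Dict.ofList [('!', "¡"), ('?', "¿")]

-- word[-1]  (the default is only a totality guard: under A's endswith guard the word is nonempty)
def pvLast (w : String) : Char := (PySem.Str.pyGet? w (-1)).getD ' '

-- dmap[word[-1]]  (total form of the guarded lookup; the guard makes the key present)
def pvMark (w : String) : String := (PySem.Dict.get? pvDmap (pvLast w)).getD ""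

-- loop body of A: state = (result, temp)
def pvStepA (st : List String × List String) (word : String) : List String × List String :=
  let temp := st.2 ++ [word]
  if PySem.Str.endswith word "!" || PySem.Str.endswith word "?" then
    let m := pvMark word
    let temp :=
      match temp with
      | [] => []
      | t0 :: rest => if PySem.Str.startswith t0 m then t0 :: rest else (m ++ t0) :: rest
    (st.1 ++ temp, ([] : List String))
  else (st.1, temp)

def fixInvertedPunc (string : String) : String :=
  PySem.Str.join " " (((PySem.Str.split₀ string).foldl pvStepA ([], [])).1)

-- ===== PORT B =====
-- w[-1] in dmap
def pvIsB (w : String) : Bool := (PySem.Dict.get? pvDmap (pvLast w)).isSome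

-- seg with seg[0] given the mark unless it already starts with it
def pvFixSeg (m : String) (seg : List String) : List String :=
  match seg with
  | [] => []
  | s0 :: rest => if PySem.Str.startswith s0 m then s0 :: rest else (m ++ s0) :: rest

-- loop body of B: state = (pieces, start)
def pvStepB (words : List String) (st : List String × Int) (p : Int × String) : List String × Int :=
  if pvIsB p.2 then
    let seg := pvFixSeg (pvMark p.2) (PySem.List.slice words (some st.2) (some (p.1 + 1)))
    (st.1 ++ [PySem.Str.join " " seg], p.1 + 1)
  else st

def fixInvertedPunc_alt (string : String) : String :=
  let words := PySem.Str.split₀ string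
  PySem.Str.join " " (((PySem.List.enumerate words 0).foldl (pvStepB words) ([], 0)).1)

-- ===== PRECONDITION & SPEC =====
def Spec_fixInvertedPunc (string : String) (out : String) : Prop := out = fixInvertedPunc_alt string
instance (string : String) (out : String) : Decidable (Spec_fixInvertedPunc string out) := by unfold Spec_fixInvertedPunc; infer_instance

-- ===== CLAIM (what is proved, stated in full; the proofs are below) =====
def Claim_equal_fixInvertedPunc : Prop := ∀ (string : String), Dom_fixInvertedPunc string → Spec_fixInvertedPunc string (fixInvertedPunc string)

-- ===== LEMMAS AND PROOFS =====

-- a one-character suffix is the last character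
lemma pvSuffix_singleton (l : List Char) (a x : Char) : ([x] <:+ l ++ [a]) ↔ a = x := by
  constructor
  · rintro ⟨t, ht⟩
    have := (List.append_inj' ht rfl).2
    simpa [eq_comm] using this
  · rintro rfl; exact ⟨l, rfl⟩

lemma pvEndswith_singleton (l : List Char) (a x : Char) :
    PySem.Chars.endswith (l ++ [a]) [x] = (a == x) := by
  rcases he : PySem.Chars.endswith (l ++ [a]) [x]
  · have hn : ¬ ([x] <:+ l ++ [a]) := by
      rw [← PySem.Chars.endswith_iff, he]; simp
    rw [pvSuffix_singleton] at hn
    simp [hn]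
  · have hy : [x] <:+ l ++ [a] := (PySem.Chars.endswith_iff _ _).mp he
    rw [pvSuffix_singleton] at hy
    simp [hy]

lemma pvDmap_isSome (c : Char) : (PySem.Dict.get? pvDmap c).isSome = (c == '!' || c == '?') := by
  have hm : pvDmap = PySem.Dict.mk [('!', "¡"), ('?', "¿")] := by decide
  rw [hm, PySem.Dict.get?_mk_cons, PySem.Dict.get?_mk_cons]
  rcases h1 : ('!' == c) <;> rcases h2 : ('?' == c) <;> simp_all [PySem.Dict.get?, BEq.comm]

-- the boundary tests of A and B agree on every word
lemma pvIsB_eq (w : String) :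
    pvIsB w = (PySem.Str.endswith w "!" || PySem.Str.endswith w "?") := by
  unfold pvIsB pvLast
  rw [pvDmap_isSome]
  have hb : ("!" : String).toList = ['!'] := by decide
  have hq : ("?" : String).toList = ['?'] := by decide
  rcases List.eq_nil_or_concat w.toList with h | ⟨l, a, h⟩
  · simp only [PySem.Str.pyGet?_eq, PySem.Str.endswith_eq, h,
      PySem.Chars.pyGet?_eq_listPyGet?, hb, hq]
    decide
  · rw [List.concat_eq_append] at h
    simp only [PySem.Str.pyGet?_eq, PySem.Str.endswith_eq, h,
      PySem.Chars.pyGet?_eq_listPyGet?, PySem.List.pyGet?_neg_one_append_singleton,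
      Option.getD_some, hb, hq, pvEndswith_singleton]

-- A's inline fix of temp[0] is B's pvFixSeg
lemma pvFixA_eq (m : String) (seg : List String) :
    (match seg with
      | [] => ([] : List String)
      | t0 :: rest => if PySem.Str.startswith t0 m then t0 :: rest else (m ++ t0) :: rest)
      = pvFixSeg m seg := rfl

-- pvFixSeg of a nonempty segment is nonempty
lemma pvFixSeg_ne (m : String) (seg : List String) (h : seg ≠ []) : pvFixSeg m seg ≠ [] := by
  rcases seg with _ | ⟨s0, rest⟩
  · exact absurd rfl h
  · show (if PySem.Str.startswith s0 m then s0 :: rest else (m ++ s0) :: rest) ≠ []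
    split_ifs <;> simp

-- joining a concatenation of two nonempty word lists
lemma pvJoinChars_append (d : List Char) (xs ys : List (List Char)) (hx : xs ≠ []) (hy : ys ≠ []) :
    PySem.Chars.join d (xs ++ ys) = PySem.Chars.join d xs ++ d ++ PySem.Chars.join d ys := by
  induction xs with
  | nil => exact absurd rfl hx
  | cons x xs ih =>
    rcases xs with _ | ⟨x2, rest⟩
    · rcases ys with _ | ⟨y, t⟩
      · exact absurd rfl hy
      · simp [PySem.Chars.join_cons_cons, PySem.Chars.join_singleton]
    · rw [List.cons_append, List.cons_append, PySem.Chars.join_cons_cons,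
        PySem.Chars.join_cons_cons, ← List.cons_append, ih (by simp)]
      simp [List.append_assoc]

-- joining the flattened segments = joining the per-segment joins (Chars level)
lemma pvCharsJoin_flatten (d : List Char) (segs : List (List (List Char)))
    (h : ∀ s ∈ segs, s ≠ []) :
    PySem.Chars.join d segs.flatten = PySem.Chars.join d (segs.map (PySem.Chars.join d)) := by
  induction segs with
  | nil => simp
  | cons s rest ih =>
    have hs : s ≠ [] := h s (by simp)
    rcases rest with _ | ⟨r, rest'⟩
    · simp [PySem.Chars.join_singleton]
    · have hr : r ≠ [] := h r (by simp)
      have hfl : (r :: rest').flatten ≠ [] := by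
        simp only [List.flatten_cons]
        intro hcon
        exact hr (List.append_eq_nil_iff.mp hcon).1
      rw [List.flatten_cons, pvJoinChars_append d s ((r :: rest').flatten) hs hfl,
        ih (fun t ht => h t (by simp [ht]))]
      rcases hmr : (r :: rest').map (PySem.Chars.join d) with _ | ⟨j, js⟩
      · simp at hmr
      · rw [List.map_cons, hmr, PySem.Chars.join_cons_cons]

-- the same, at the String level with separator " "
lemma pvJoin_flatten (segs : List (List String)) (hne : ∀ s ∈ segs, s ≠ []) :
    PySem.Str.join " " segs.flatten = PySem.Str.join " " (segs.map (PySem.Str.join " ")) := by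
  apply String.toList_inj.mp
  rw [PySem.Str.toList_join, PySem.Str.toList_join]
  have h1 : List.map String.toList segs.flatten
      = (segs.map (List.map String.toList)).flatten := by
    simp [List.map_flatten]
  have h2 : List.map String.toList (segs.map (PySem.Str.join " "))
      = (segs.map (List.map String.toList)).map (PySem.Chars.join " ".toList) := by
    simp [Function.comp, PySem.Str.toList_join]
  rw [h1, h2]
  exact pvCharsJoin_flatten _ _ (by
    intro s hsm
    rcases List.mem_map.mp hsm with ⟨t, ht, rfl⟩
    simp only [ne_eq, List.map_eq_nil_iff]
    exact hne t ht)

-- main loop correspondence between A's streaming fold and B's boundary fold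
lemma pvLoop (words : List String) : ∀ (ws temp : List String) (segs : List (List String)) (k : Nat),
    words.drop k = temp ++ ws →
    (∀ s ∈ segs, s ≠ []) →
    PySem.Str.join " " ((ws.foldl pvStepA (segs.flatten, temp)).1)
      = PySem.Str.join " "
          (((PySem.List.enumerate ws ((k : Int) + (temp.length : Int))).foldl (pvStepB words)
              (segs.map (PySem.Str.join " "), (k : Int))).1) := by
  intro ws
  induction ws with
  | nil =>
    intro temp segs k _ hne
    simpa using pvJoin_flatten segs hne
  | cons w ws' ih =>
    intro temp segs k h hne
    rw [PySem.List.enumerate_cons, List.foldl_cons, List.foldl_cons]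
    rcases hb : (PySem.Str.endswith w "!" || PySem.Str.endswith w "?")
    · -- not a boundary word: both states only advance
      have hB : pvIsB w = false := by rw [pvIsB_eq, hb]
      simp only [pvStepA, pvStepB, hb, hB, Bool.false_eq_true, if_false]
      have hlen : ((k : Int) + (temp.length : Int)) + 1
          = (k : Int) + (((temp ++ [w]).length : Nat) : Int) := by
        push_cast [List.length_append, List.length_cons, List.length_nil]; omega
      rw [hlen]
      exact ih (temp ++ [w]) segs k (by rw [h]; simp) hne
    · -- boundary word: A flushes temp, B emits the slice words[start:i+1]
      have hB : pvIsB w = true := by rw [pvIsB_eq, hb]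
      simp only [pvStepA, pvStepB, hb, hB, if_true]
      have hsl : PySem.List.slice words (some (k : Int))
          (some (((k : Int) + (temp.length : Int)) + 1)) = temp ++ [w] := by
        have hc : ((k : Int) + (temp.length : Int)) + 1
            = (k : Int) + (((temp.length + 1 : Nat)) : Int) := by push_cast; ring
        rw [hc, PySem.List.slice_natCast_add, h, List.take_append]
        simp
      rw [hsl, pvFixA_eq]
      have hFne : pvFixSeg (pvMark w) (temp ++ [w]) ≠ [] := pvFixSeg_ne _ _ (by simp)
      have hflat : segs.flatten ++ pvFixSeg (pvMark w) (temp ++ [w])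
          = (segs ++ [pvFixSeg (pvMark w) (temp ++ [w])]).flatten := by simp
      have hmap : segs.map (PySem.Str.join " ") ++ [PySem.Str.join " " (pvFixSeg (pvMark w) (temp ++ [w]))]
          = (segs ++ [pvFixSeg (pvMark w) (temp ++ [w])]).map (PySem.Str.join " ") := by simp
      have hk' : ((k : Int) + (temp.length : Int)) + 1
          = ((k + temp.length + 1 : Nat) : Int) + (([] : List String).length : Int) := by
        push_cast [List.length_nil]; omega
      rw [hflat, hmap, hk']
      have hdrop : words.drop (k + temp.length + 1) = ([] : List String) ++ ws' := by
        have : words.drop (k + temp.length + 1) = (words.drop k).drop (temp.length + 1) := by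
          rw [List.drop_drop]; ring_nf
        rw [this, h, List.drop_append]
        simp
      have hne' : ∀ s ∈ segs ++ [pvFixSeg (pvMark w) (temp ++ [w])], s ≠ [] := by
        intro s hs
        rcases List.mem_append.mp hs with hs | hs
        · exact hne s hs
        · simp only [List.mem_singleton] at hs
          subst hs; exact hFne
      exact ih [] (segs ++ [pvFixSeg (pvMark w) (temp ++ [w])]) (k + temp.length + 1) hdrop hne'

-- ===== VERDICT (by name: the statement is the Claim_ definition above) =====
theorem fixInvertedPunc_spec : Claim_equal_fixInvertedPunc := by
  intro s _
  unfold Spec_fixInvertedPunc fixInvertedPunc fixInvertedPunc_alt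
  have h := pvLoop (PySem.Str.split₀ s) (PySem.Str.split₀ s) [] [] 0 (by simp) (by simp)
  simpa using h
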